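-- pv_equiv track=rewrite | github.com/sameh1704/networkcore | core/services/snmp.py | detect_vendor
-- ===== SOURCE A (Python) =====
-- VENDOR_OIDS = {
--     # Cisco
--     "1.3.6.1.4.1.9.1.516": ("Cisco", "Catalyst 3750E"),
--     "1.3.6.1.4.1.9.1.174": ("Cisco", "Catalyst 2950"),
--     "1.3.6.1.4.1.9.1.613": ("Cisco", "Catalyst 3650"),
--     "1.3.6.1.4.1.9.1.662": ("Cisco", "Catalyst 3850"),
--     "1.3.6.1.4.1.9.1.1160": ("Cisco", "Catalyst 9300"),
--     "1.3.6.1.4.1.9.1.767": ("Cisco", "Catalyst 2960"),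
--     "1.3.6.1.4.1.9.1.1289": ("Cisco", "Catalyst 9200"),
--     "1.3.6.1.4.1.9.1.253": ("Cisco", "Cisco Router 2800"),
--     "1.3.6.1.4.1.9.1.257": ("Cisco", "Cisco Router 3800"),
--
--     # Dell PowerConnect
--     "1.3.6.1.4.1.674.10895.3033": ("Dell", "PowerConnect 3348"),
--     "1.3.6.1.4.1.674.10895.3040": ("Dell", "PowerConnect 3548"),
--     "1.3.6.1.4.1.674.10895.3050": ("Dell", "PowerConnect 5448"),
--     "1.3.6.1.4.1.674.10895.3060": ("Dell", "PowerConnect 5524"),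
--
--     # Fortinet FortiSwitch
--     "1.3.6.1.4.1.12356.101.1": ("Fortinet", "FortiSwitch 108E"),
--     "1.3.6.1.4.1.12356.101.2": ("Fortinet", "FortiSwitch 148E"),
--     "1.3.6.1.4.1.12356.101.3": ("Fortinet", "FortiSwitch 224E"),
--     "1.3.6.1.4.1.12356.101.4": ("Fortinet", "FortiSwitch 424E"),
--
--     # HP/Aruba
--     "1.3.6.1.4.1.11.2.3.7.11.1": ("HP", "ProCurve Switch"),
--     "1.3.6.1.4.1.11.2.3.7.11.2": ("HP", "Aruba Switch"),
--
--     # Juniper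
--     "1.3.6.1.4.1.45.3.60.1": ("Juniper", "EX Series"),
--     "1.3.6.1.4.1.45.3.60.2": ("Juniper", "QFX Series"),
--
--     # Generic
--     "1.3.6.1.4.1.8072.3.2.10": ("Linux", "Generic SNMP Agent"),
--     "1.3.6.1.4.1.2021.250.3": ("FreeBSD", "Generic SNMP Agent"),
-- }
--
-- def detect_vendor(sys_object_id):
--     """
--     التعرف على نوع الجهاز من SysObjectID
--     """
--     sys_oid = str(sys_object_id).strip()
--
--     for oid, (vendor, model) in VENDOR_OIDS.items():
--         if sys_oid.startswith(oid):
--             return vendor, model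
--
--     if sys_oid.startswith("1.3.6.1.4.1.9"):
--         return "Cisco", "Unknown Cisco Device"
--     elif sys_oid.startswith("1.3.6.1.4.1.674"):
--         return "Dell", "Unknown Dell Device"
--     elif sys_oid.startswith("1.3.6.1.4.1.12356"):
--         return "Fortinet", "Unknown Fortinet Device"
--     elif sys_oid.startswith("1.3.6.1.4.1.11"):
--         return "HP/Aruba", "Unknown HP Device"
--     elif sys_oid.startswith("1.3.6.1.4.1.45"):
--         return "Juniper", "Unknown Juniper Device"
--     else:
--         return "Unknown", "Generic SNMP Device"
-- ===== SOURCE B (Python) =====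
-- # Two-level grouped dispatch: pick the vendor family by its root prefix once,
-- # then match only that family's suffixes on the remainder (alternative structure
-- # to A's flat ordered scan + elif chain).
--
-- _GROUPS = [
--     ("1.3.6.1.4.1.9", ("Cisco", "Unknown Cisco Device"), [
--         (".1.516", ("Cisco", "Catalyst 3750E")),
--         (".1.174", ("Cisco", "Catalyst 2950")),
--         (".1.613", ("Cisco", "Catalyst 3650")),
--         (".1.662", ("Cisco", "Catalyst 3850")),
--         (".1.1160", ("Cisco", "Catalyst 9300")),
--         (".1.767", ("Cisco", "Catalyst 2960")),
--         (".1.1289", ("Cisco", "Catalyst 9200")),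
--         (".1.253", ("Cisco", "Cisco Router 2800")),
--         (".1.257", ("Cisco", "Cisco Router 3800")),
--     ]),
--     ("1.3.6.1.4.1.674", ("Dell", "Unknown Dell Device"), [
--         (".10895.3033", ("Dell", "PowerConnect 3348")),
--         (".10895.3040", ("Dell", "PowerConnect 3548")),
--         (".10895.3050", ("Dell", "PowerConnect 5448")),
--         (".10895.3060", ("Dell", "PowerConnect 5524")),
--     ]),
--     ("1.3.6.1.4.1.12356", ("Fortinet", "Unknown Fortinet Device"), [
--         (".101.1", ("Fortinet", "FortiSwitch 108E")),
--         (".101.2", ("Fortinet", "FortiSwitch 148E")),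
--         (".101.3", ("Fortinet", "FortiSwitch 224E")),
--         (".101.4", ("Fortinet", "FortiSwitch 424E")),
--     ]),
--     ("1.3.6.1.4.1.11", ("HP/Aruba", "Unknown HP Device"), [
--         (".2.3.7.11.1", ("HP", "ProCurve Switch")),
--         (".2.3.7.11.2", ("HP", "Aruba Switch")),
--     ]),
--     ("1.3.6.1.4.1.45", ("Juniper", "Unknown Juniper Device"), [
--         (".3.60.1", ("Juniper", "EX Series")),
--         (".3.60.2", ("Juniper", "QFX Series")),
--     ]),
--     ("1.3.6.1.4.1.8072.3.2.10", ("Linux", "Generic SNMP Agent"), []),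
--     ("1.3.6.1.4.1.2021.250.3", ("FreeBSD", "Generic SNMP Agent"), []),
-- ]
--
--
-- def detect_vendor(sys_object_id):
--     sys_oid = str(sys_object_id).strip()
--     for root, fallback, specifics in _GROUPS:
--         if sys_oid.startswith(root):
--             rest = sys_oid[len(root):]
--             for suffix, result in specifics:
--                 if rest.startswith(suffix):
--                     return result
--             return fallback
--     return ("Unknown", "Generic SNMP Device")
-- ===== Notes on version B (the rewrite author's own statement) =====
-- stated objective: alternative
-- what changed: Replaces A's flat ordered first-match scan over 24 full OIDs plus a five-branch elif family chain by a two-level grouped dispatch: first select the vendor family by its root prefix, then match only that family's suffixes against the remainder of the string; equivalent because the family roots are pairwise prefix-incomparable, so at most one group can match.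
import Mathlib
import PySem

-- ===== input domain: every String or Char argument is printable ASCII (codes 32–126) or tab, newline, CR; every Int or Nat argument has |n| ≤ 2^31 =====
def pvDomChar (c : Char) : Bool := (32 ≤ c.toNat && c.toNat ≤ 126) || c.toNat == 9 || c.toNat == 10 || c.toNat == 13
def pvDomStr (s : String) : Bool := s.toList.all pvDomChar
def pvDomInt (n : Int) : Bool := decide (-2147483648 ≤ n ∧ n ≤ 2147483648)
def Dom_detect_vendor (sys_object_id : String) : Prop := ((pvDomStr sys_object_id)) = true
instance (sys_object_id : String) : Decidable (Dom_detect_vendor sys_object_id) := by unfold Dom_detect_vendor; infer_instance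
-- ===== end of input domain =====

-- B replaces A's flat ordered first-match scan + elif family chain by a two-level
-- grouped dispatch: pick the vendor family by its root prefix, then match only that
-- family's suffixes on the remainder (alternative structure, same cost).

-- ===== PORT A =====
-- VENDOR_OIDS dict, in insertion order
def pvVENDOR_OIDS : List (String × String × String) :=
  [ ("1.3.6.1.4.1.9.1.516", "Cisco", "Catalyst 3750E"),
      ("1.3.6.1.4.1.9.1.174", "Cisco", "Catalyst 2950"),
      ("1.3.6.1.4.1.9.1.613", "Cisco", "Catalyst 3650"),
      ("1.3.6.1.4.1.9.1.662", "Cisco", "Catalyst 3850"),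
      ("1.3.6.1.4.1.9.1.1160", "Cisco", "Catalyst 9300"),
      ("1.3.6.1.4.1.9.1.767", "Cisco", "Catalyst 2960"),
      ("1.3.6.1.4.1.9.1.1289", "Cisco", "Catalyst 9200"),
      ("1.3.6.1.4.1.9.1.253", "Cisco", "Cisco Router 2800"),
      ("1.3.6.1.4.1.9.1.257", "Cisco", "Cisco Router 3800"),
      ("1.3.6.1.4.1.674.10895.3033", "Dell", "PowerConnect 3348"),
      ("1.3.6.1.4.1.674.10895.3040", "Dell", "PowerConnect 3548"),
      ("1.3.6.1.4.1.674.10895.3050", "Dell", "PowerConnect 5448"),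
      ("1.3.6.1.4.1.674.10895.3060", "Dell", "PowerConnect 5524"),
      ("1.3.6.1.4.1.12356.101.1", "Fortinet", "FortiSwitch 108E"),
      ("1.3.6.1.4.1.12356.101.2", "Fortinet", "FortiSwitch 148E"),
      ("1.3.6.1.4.1.12356.101.3", "Fortinet", "FortiSwitch 224E"),
      ("1.3.6.1.4.1.12356.101.4", "Fortinet", "FortiSwitch 424E"),
      ("1.3.6.1.4.1.11.2.3.7.11.1", "HP", "ProCurve Switch"),
      ("1.3.6.1.4.1.11.2.3.7.11.2", "HP", "Aruba Switch"),
      ("1.3.6.1.4.1.45.3.60.1", "Juniper", "EX Series"),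
      ("1.3.6.1.4.1.45.3.60.2", "Juniper", "QFX Series"),
      ("1.3.6.1.4.1.8072.3.2.10", "Linux", "Generic SNMP Agent"),
      ("1.3.6.1.4.1.2021.250.3", "FreeBSD", "Generic SNMP Agent") ]

-- the 'for oid, (vendor, model) in VENDOR_OIDS.items(): if …: return …' loop
def pvLoopA (sys_oid : String) : List (String × String × String) → Option (String × String)
  | [] => none
  | (oid, vendor, model) :: rest =>
      if PySem.Str.startswith sys_oid oid then some (vendor, model) else pvLoopA sys_oid rest

def detect_vendor (sys_object_id : String) : String × String :=
  let sys_oid := PySem.Str.strip sys_object_id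
  match pvLoopA sys_oid pvVENDOR_OIDS with
  | some r => r
  | none =>
    if PySem.Str.startswith sys_oid "1.3.6.1.4.1.9" then ("Cisco", "Unknown Cisco Device")
    else if PySem.Str.startswith sys_oid "1.3.6.1.4.1.674" then ("Dell", "Unknown Dell Device")
    else if PySem.Str.startswith sys_oid "1.3.6.1.4.1.12356" then ("Fortinet", "Unknown Fortinet Device")
    else if PySem.Str.startswith sys_oid "1.3.6.1.4.1.11" then ("HP/Aruba", "Unknown HP Device")
    else if PySem.Str.startswith sys_oid "1.3.6.1.4.1.45" then ("Juniper", "Unknown Juniper Device")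
    else ("Unknown", "Generic SNMP Device")

-- ===== PORT B =====
-- Source B's _GROUPS: (family root, family fallback, list of (suffix, result))
def pvGROUPS : List (String × (String × String) × List (String × (String × String))) :=
  [ ("1.3.6.1.4.1.9", ("Cisco", "Unknown Cisco Device"),
      [(".1.516", ("Cisco", "Catalyst 3750E")), (".1.174", ("Cisco", "Catalyst 2950")), (".1.613", ("Cisco", "Catalyst 3650")), (".1.662", ("Cisco", "Catalyst 3850")), (".1.1160", ("Cisco", "Catalyst 9300")), (".1.767", ("Cisco", "Catalyst 2960")), (".1.1289", ("Cisco", "Catalyst 9200")), (".1.253", ("Cisco", "Cisco Router 2800")), (".1.257", ("Cisco", "Cisco Router 3800"))]),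
    ("1.3.6.1.4.1.674", ("Dell", "Unknown Dell Device"),
      [(".10895.3033", ("Dell", "PowerConnect 3348")), (".10895.3040", ("Dell", "PowerConnect 3548")), (".10895.3050", ("Dell", "PowerConnect 5448")), (".10895.3060", ("Dell", "PowerConnect 5524"))]),
    ("1.3.6.1.4.1.12356", ("Fortinet", "Unknown Fortinet Device"),
      [(".101.1", ("Fortinet", "FortiSwitch 108E")), (".101.2", ("Fortinet", "FortiSwitch 148E")), (".101.3", ("Fortinet", "FortiSwitch 224E")), (".101.4", ("Fortinet", "FortiSwitch 424E"))]),
    ("1.3.6.1.4.1.11", ("HP/Aruba", "Unknown HP Device"),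
      [(".2.3.7.11.1", ("HP", "ProCurve Switch")), (".2.3.7.11.2", ("HP", "Aruba Switch"))]),
    ("1.3.6.1.4.1.45", ("Juniper", "Unknown Juniper Device"),
      [(".3.60.1", ("Juniper", "EX Series")), (".3.60.2", ("Juniper", "QFX Series"))]),
    ("1.3.6.1.4.1.8072.3.2.10", ("Linux", "Generic SNMP Agent"),
      []),
    ("1.3.6.1.4.1.2021.250.3", ("FreeBSD", "Generic SNMP Agent"),
      []) ]

-- the inner 'for suffix, result in specifics' loop of Source B
def pvInner (rest : String) (fb : String × String) : List (String × (String × String)) → String × String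
  | [] => fb
  | (suffix, result) :: specs =>
      if PySem.Str.startswith rest suffix then result else pvInner rest fb specs

-- the outer 'for root, fallback, specifics in _GROUPS' loop of Source B
def pvOuter (sys_oid : String) : List (String × (String × String) × List (String × (String × String))) → String × String
  | [] => ("Unknown", "Generic SNMP Device")
  | (root, fallback, specifics) :: groups =>
      if PySem.Str.startswith sys_oid root then
        pvInner (PySem.Str.slice sys_oid (some (PySem.Str.len root)) none) fallback specifics
      else pvOuter sys_oid groups

def detect_vendor_alt (sys_object_id : String) : String × String :=
  let sys_oid := PySem.Str.strip sys_object_id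
  pvOuter sys_oid pvGROUPS

-- ===== PRECONDITION & SPEC =====
def Spec_detect_vendor (sys_object_id : String) (out : String × String) : Prop := out = detect_vendor_alt sys_object_id
instance (sys_object_id : String) (out : String × String) : Decidable (Spec_detect_vendor sys_object_id out) := by unfold Spec_detect_vendor; infer_instance

-- ===== CLAIM =====
def Claim_equal_detect_vendor : Prop := ∀ (sys_object_id : String), Dom_detect_vendor sys_object_id → Spec_detect_vendor sys_object_id (detect_vendor sys_object_id)

-- ===== LEMMAS AND PROOFS =====

-- A's elif family chain, as a table
def pvFAM : List (String × String × String) :=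
  [ ("1.3.6.1.4.1.9", "Cisco", "Unknown Cisco Device"), ("1.3.6.1.4.1.674", "Dell", "Unknown Dell Device"), ("1.3.6.1.4.1.12356", "Fortinet", "Unknown Fortinet Device"), ("1.3.6.1.4.1.11", "HP/Aruba", "Unknown HP Device"), ("1.3.6.1.4.1.45", "Juniper", "Unknown Juniper Device") ]

/-- First-match semantics: value of the first entry whose prefix matches, else the default. -/
def pvFirst (t : String) : List (String × String × String) → String × String → String × String
  | [], d => d
  | (p, vv, mm) :: r, d => if PySem.Str.startswith t p then (vv, mm) else pvFirst t r d

/-- A's loop-then-elif-chain is first-match over `l ++ pvFAM`. -/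
lemma pvLoopA_first (t : String) (l : List (String × String × String)) :
    (match pvLoopA t l with
     | some r => r
     | none => pvFirst t pvFAM ("Unknown", "Generic SNMP Device"))
    = pvFirst t (l ++ pvFAM) ("Unknown", "Generic SNMP Device") := by
  induction l with
  | nil => rfl
  | cons e r ih =>
    obtain ⟨p, vv, mm⟩ := e
    simp only [pvLoopA, List.cons_append, pvFirst]
    cases hs : PySem.Str.startswith t p with
    | true => rw [if_pos rfl, if_pos rfl]
    | false => rw [if_neg Bool.false_ne_true, if_neg Bool.false_ne_true, ih]

lemma sw_iff (t p : String) : PySem.Str.startswith t p = true ↔ p.toList <+: t.toList := by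
  rw [PySem.Str.startswith_eq]; exact PySem.Chars.startswith_iff _ _

/-- A non-match propagates to every extension of the prefix. -/
lemma sw_false_of (t p q : String) (hpq : p.toList <+: q.toList)
    (hp : PySem.Str.startswith t p = false) : PySem.Str.startswith t q = false := by
  cases hq : PySem.Str.startswith t q with
  | false => rfl
  | true =>
    rw [(sw_iff t p).2 (hpq.trans ((sw_iff t q).1 hq))] at hp
    exact absurd hp (by simp)

/-- Two prefix-incomparable strings cannot both be prefixes of `t`. -/
lemma sw_incomp (t p q : String) (h : ¬(p.toList <+: q.toList ∨ q.toList <+: p.toList))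
    (hp : PySem.Str.startswith t p = true) : PySem.Str.startswith t q = false := by
  cases hq : PySem.Str.startswith t q with
  | false => rfl
  | true => exact absurd (List.prefix_or_prefix_of_prefix ((sw_iff t p).1 hp) ((sw_iff t q).1 hq)) h

/-- Once the root matches, testing the suffix on the remainder is testing root++suffix on `t`. -/
lemma sw_slice (t p q r : String) (hr : p ++ q = r)
    (hp : PySem.Str.startswith t p = true) :
    PySem.Str.startswith (PySem.Str.slice t (some (PySem.Str.len p)) none) q
      = PySem.Str.startswith t r := by
  subst hr
  obtain ⟨rest, hrest⟩ := (sw_iff t p).1 hp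
  rw [Bool.eq_iff_iff, sw_iff, sw_iff, String.toList_append]
  have hsl : (PySem.Str.slice t (some (PySem.Str.len p)) none).toList
      = t.toList.drop p.toList.length := by
    rw [PySem.Str.toList_slice, PySem.Chars.slice_eq_listSlice, PySem.Str.len,
      PySem.List.slice_from _ (by positivity)]
    simp
  rw [hsl, ← hrest, List.drop_left, List.prefix_append_right_inj]

set_option maxHeartbeats 1000000 in
/-- The heart of the claim: first-match over A's flat table equals B's grouped dispatch. -/
lemma pvKey (t : String) :
    pvFirst t (pvVENDOR_OIDS ++ pvFAM) ("Unknown", "Generic SNMP Device")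
      = pvOuter t pvGROUPS := by
  by_cases h1 : PySem.Str.startswith t "1.3.6.1.4.1.9" = true
  · simp only [pvVENDOR_OIDS, pvFAM, pvGROUPS, List.cons_append, List.nil_append, pvFirst, pvOuter, pvInner, h1, sw_incomp t "1.3.6.1.4.1.9" "1.3.6.1.4.1.674.10895.3033" (by decide) h1, sw_incomp t "1.3.6.1.4.1.9" "1.3.6.1.4.1.674.10895.3040" (by decide) h1, sw_incomp t "1.3.6.1.4.1.9" "1.3.6.1.4.1.674.10895.3050" (by decide) h1, sw_incomp t "1.3.6.1.4.1.9" "1.3.6.1.4.1.674.10895.3060" (by decide) h1, sw_incomp t "1.3.6.1.4.1.9" "1.3.6.1.4.1.674" (by decide) h1, sw_incomp t "1.3.6.1.4.1.9" "1.3.6.1.4.1.12356.101.1" (by decide) h1, sw_incomp t "1.3.6.1.4.1.9" "1.3.6.1.4.1.12356.101.2" (by decide) h1, sw_incomp t "1.3.6.1.4.1.9" "1.3.6.1.4.1.12356.101.3" (by decide) h1, sw_incomp t "1.3.6.1.4.1.9" "1.3.6.1.4.1.12356.101.4" (by decide) h1, sw_incomp t "1.3.6.1.4.1.9" "1.3.6.1.4.1.12356"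 (by decide) h1, sw_incomp t "1.3.6.1.4.1.9" "1.3.6.1.4.1.11.2.3.7.11.1" (by decide) h1, sw_incomp t "1.3.6.1.4.1.9" "1.3.6.1.4.1.11.2.3.7.11.2" (by decide) h1, sw_incomp t "1.3.6.1.4.1.9" "1.3.6.1.4.1.11" (by decide) h1, sw_incomp t "1.3.6.1.4.1.9" "1.3.6.1.4.1.45.3.60.1" (by decide) h1, sw_incomp t "1.3.6.1.4.1.9" "1.3.6.1.4.1.45.3.60.2" (by decide) h1, sw_incomp t "1.3.6.1.4.1.9" "1.3.6.1.4.1.45" (by decide) h1, sw_incomp t "1.3.6.1.4.1.9" "1.3.6.1.4.1.8072.3.2.10" (by decide) h1, sw_incomp t "1.3.6.1.4.1.9" "1.3.6.1.4.1.2021.250.3" (by decide) h1, sw_slice t "1.3.6.1.4.1.9" ".1.516" "1.3.6.1.4.1.9.1.516" (by decide) h1, sw_slice t "1.3.6.1.4.1.9" ".1.174" "1.3.6.1.4.1.9.1.174" (by decide) h1, sw_slice t "1.3.6.1.4.1.9" ".1.613" "1.3.6.1.4.1.9.1.613" (by decide) h1, sw_slice t "1.3.6.1.4.1.9" ".1.662"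 "1.3.6.1.4.1.9.1.662" (by decide) h1, sw_slice t "1.3.6.1.4.1.9" ".1.1160" "1.3.6.1.4.1.9.1.1160" (by decide) h1, sw_slice t "1.3.6.1.4.1.9" ".1.767" "1.3.6.1.4.1.9.1.767" (by decide) h1, sw_slice t "1.3.6.1.4.1.9" ".1.1289" "1.3.6.1.4.1.9.1.1289" (by decide) h1, sw_slice t "1.3.6.1.4.1.9" ".1.253" "1.3.6.1.4.1.9.1.253" (by decide) h1, sw_slice t "1.3.6.1.4.1.9" ".1.257" "1.3.6.1.4.1.9.1.257" (by decide) h1, Bool.false_eq_true, if_false, if_true]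
  · rw [Bool.not_eq_true] at h1
    by_cases h2 : PySem.Str.startswith t "1.3.6.1.4.1.674" = true
    · simp only [pvVENDOR_OIDS, pvFAM, pvGROUPS, List.cons_append, List.nil_append, pvFirst, pvOuter, pvInner, h1, h2, sw_false_of t "1.3.6.1.4.1.9" "1.3.6.1.4.1.9.1.516" (by decide) h1, sw_false_of t "1.3.6.1.4.1.9" "1.3.6.1.4.1.9.1.174" (by decide) h1, sw_false_of t "1.3.6.1.4.1.9" "1.3.6.1.4.1.9.1.613" (by decide) h1, sw_false_of t "1.3.6.1.4.1.9" "1.3.6.1.4.1.9.1.662" (by decide) h1, sw_false_of t "1.3.6.1.4.1.9" "1.3.6.1.4.1.9.1.1160" (by decide) h1, sw_false_of t "1.3.6.1.4.1.9" "1.3.6.1.4.1.9.1.767" (by decide) h1, sw_false_of t "1.3.6.1.4.1.9" "1.3.6.1.4.1.9.1.1289" (by decide) h1, sw_false_of t "1.3.6.1.4.1.9" "1.3.6.1.4.1.9.1.253" (by decide) h1, sw_false_of t "1.3.6.1.4.1.9" "1.3.6.1.4.1.9.1.257" (by decide) h1, sw_incomp t "1.3.6.1.4.1.674" "1.3.6.1.4.1.12356.101.1"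 (by decide) h2, sw_incomp t "1.3.6.1.4.1.674" "1.3.6.1.4.1.12356.101.2" (by decide) h2, sw_incomp t "1.3.6.1.4.1.674" "1.3.6.1.4.1.12356.101.3" (by decide) h2, sw_incomp t "1.3.6.1.4.1.674" "1.3.6.1.4.1.12356.101.4" (by decide) h2, sw_incomp t "1.3.6.1.4.1.674" "1.3.6.1.4.1.12356" (by decide) h2, sw_incomp t "1.3.6.1.4.1.674" "1.3.6.1.4.1.11.2.3.7.11.1" (by decide) h2, sw_incomp t "1.3.6.1.4.1.674" "1.3.6.1.4.1.11.2.3.7.11.2" (by decide) h2, sw_incomp t "1.3.6.1.4.1.674" "1.3.6.1.4.1.11" (by decide) h2, sw_incomp t "1.3.6.1.4.1.674" "1.3.6.1.4.1.45.3.60.1" (by decide) h2, sw_incomp t "1.3.6.1.4.1.674" "1.3.6.1.4.1.45.3.60.2" (by decide) h2, sw_incomp t "1.3.6.1.4.1.674" "1.3.6.1.4.1.45" (by decide) h2, sw_incomp t "1.3.6.1.4.1.674" "1.3.6.1.4.1.8072.3.2.10" (by decide) h2, sw_incomp t "1.3.6.1.4.1.674" "1.3.6.1.4.1.2021.250.3"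 (by decide) h2, sw_slice t "1.3.6.1.4.1.674" ".10895.3033" "1.3.6.1.4.1.674.10895.3033" (by decide) h2, sw_slice t "1.3.6.1.4.1.674" ".10895.3040" "1.3.6.1.4.1.674.10895.3040" (by decide) h2, sw_slice t "1.3.6.1.4.1.674" ".10895.3050" "1.3.6.1.4.1.674.10895.3050" (by decide) h2, sw_slice t "1.3.6.1.4.1.674" ".10895.3060" "1.3.6.1.4.1.674.10895.3060" (by decide) h2, Bool.false_eq_true, if_false, if_true]
    · rw [Bool.not_eq_true] at h2
      by_cases h3 : PySem.Str.startswith t "1.3.6.1.4.1.12356" = true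
      · simp only [pvVENDOR_OIDS, pvFAM, pvGROUPS, List.cons_append, List.nil_append, pvFirst, pvOuter, pvInner, h1, h2, h3, sw_false_of t "1.3.6.1.4.1.9" "1.3.6.1.4.1.9.1.516" (by decide) h1, sw_false_of t "1.3.6.1.4.1.9" "1.3.6.1.4.1.9.1.174" (by decide) h1, sw_false_of t "1.3.6.1.4.1.9" "1.3.6.1.4.1.9.1.613" (by decide) h1, sw_false_of t "1.3.6.1.4.1.9" "1.3.6.1.4.1.9.1.662" (by decide) h1, sw_false_of t "1.3.6.1.4.1.9" "1.3.6.1.4.1.9.1.1160" (by decide) h1, sw_false_of t "1.3.6.1.4.1.9" "1.3.6.1.4.1.9.1.767" (by decide) h1, sw_false_of t "1.3.6.1.4.1.9" "1.3.6.1.4.1.9.1.1289" (by decide) h1, sw_false_of t "1.3.6.1.4.1.9" "1.3.6.1.4.1.9.1.253" (by decide) h1, sw_false_of t "1.3.6.1.4.1.9" "1.3.6.1.4.1.9.1.257" (by decide) h1, sw_false_of t "1.3.6.1.4.1.674" "1.3.6.1.4.1.674.10895.3033" (by decide) h2, sw_false_of t "1.3.6.1.4.1.674" "1.3.6.1.4.1.674.10895.3040"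 (by decide) h2, sw_false_of t "1.3.6.1.4.1.674" "1.3.6.1.4.1.674.10895.3050" (by decide) h2, sw_false_of t "1.3.6.1.4.1.674" "1.3.6.1.4.1.674.10895.3060" (by decide) h2, sw_incomp t "1.3.6.1.4.1.12356" "1.3.6.1.4.1.11.2.3.7.11.1" (by decide) h3, sw_incomp t "1.3.6.1.4.1.12356" "1.3.6.1.4.1.11.2.3.7.11.2" (by decide) h3, sw_incomp t "1.3.6.1.4.1.12356" "1.3.6.1.4.1.11" (by decide) h3, sw_incomp t "1.3.6.1.4.1.12356" "1.3.6.1.4.1.45.3.60.1" (by decide) h3, sw_incomp t "1.3.6.1.4.1.12356" "1.3.6.1.4.1.45.3.60.2" (by decide) h3, sw_incomp t "1.3.6.1.4.1.12356" "1.3.6.1.4.1.45" (by decide) h3, sw_incomp t "1.3.6.1.4.1.12356" "1.3.6.1.4.1.8072.3.2.10" (by decide) h3, sw_incomp t "1.3.6.1.4.1.12356" "1.3.6.1.4.1.2021.250.3" (by decide) h3, sw_slice t "1.3.6.1.4.1.12356" ".101.1" "1.3.6.1.4.1.12356.101.1" (by decide) h3, sw_slice t "1.3.6.1.4.1.12356"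 ".101.2" "1.3.6.1.4.1.12356.101.2" (by decide) h3, sw_slice t "1.3.6.1.4.1.12356" ".101.3" "1.3.6.1.4.1.12356.101.3" (by decide) h3, sw_slice t "1.3.6.1.4.1.12356" ".101.4" "1.3.6.1.4.1.12356.101.4" (by decide) h3, Bool.false_eq_true, if_false, if_true]
      · rw [Bool.not_eq_true] at h3
        by_cases h4 : PySem.Str.startswith t "1.3.6.1.4.1.11" = true
        · simp only [pvVENDOR_OIDS, pvFAM, pvGROUPS, List.cons_append, List.nil_append, pvFirst, pvOuter, pvInner, h1, h2, h3, h4, sw_false_of t "1.3.6.1.4.1.9" "1.3.6.1.4.1.9.1.516" (by decide) h1, sw_false_of t "1.3.6.1.4.1.9" "1.3.6.1.4.1.9.1.174" (by decide) h1, sw_false_of t "1.3.6.1.4.1.9" "1.3.6.1.4.1.9.1.613" (by decide) h1, sw_false_of t "1.3.6.1.4.1.9" "1.3.6.1.4.1.9.1.662" (by decide) h1, sw_false_of t "1.3.6.1.4.1.9" "1.3.6.1.4.1.9.1.1160" (by decide) h1, sw_false_of t "1.3.6.1.4.1.9" "1.3.6.1.4.1.9.1.767" (by decide) h1, sw_false_of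 t "1.3.6.1.4.1.9" "1.3.6.1.4.1.9.1.1289" (by decide) h1, sw_false_of t "1.3.6.1.4.1.9" "1.3.6.1.4.1.9.1.253" (by decide) h1, sw_false_of t "1.3.6.1.4.1.9" "1.3.6.1.4.1.9.1.257" (by decide) h1, sw_false_of t "1.3.6.1.4.1.674" "1.3.6.1.4.1.674.10895.3033" (by decide) h2, sw_false_of t "1.3.6.1.4.1.674" "1.3.6.1.4.1.674.10895.3040" (by decide) h2, sw_false_of t "1.3.6.1.4.1.674" "1.3.6.1.4.1.674.10895.3050" (by decide) h2, sw_false_of t "1.3.6.1.4.1.674" "1.3.6.1.4.1.674.10895.3060" (by decide) h2, sw_false_of t "1.3.6.1.4.1.12356" "1.3.6.1.4.1.12356.101.1" (by decide) h3, sw_false_of t "1.3.6.1.4.1.12356" "1.3.6.1.4.1.12356.101.2" (by decide) h3, sw_false_of t "1.3.6.1.4.1.12356" "1.3.6.1.4.1.12356.101.3" (by decide) h3, sw_false_of t "1.3.6.1.4.1.12356" "1.3.6.1.4.1.12356.101.4" (by decide) h3, sw_incomp t "1.3.6.1.4.1.11" "1.3.6.1.4.1.45.3.60.1" (by decide) h4,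 sw_incomp t "1.3.6.1.4.1.11" "1.3.6.1.4.1.45.3.60.2" (by decide) h4, sw_incomp t "1.3.6.1.4.1.11" "1.3.6.1.4.1.45" (by decide) h4, sw_incomp t "1.3.6.1.4.1.11" "1.3.6.1.4.1.8072.3.2.10" (by decide) h4, sw_incomp t "1.3.6.1.4.1.11" "1.3.6.1.4.1.2021.250.3" (by decide) h4, sw_slice t "1.3.6.1.4.1.11" ".2.3.7.11.1" "1.3.6.1.4.1.11.2.3.7.11.1" (by decide) h4, sw_slice t "1.3.6.1.4.1.11" ".2.3.7.11.2" "1.3.6.1.4.1.11.2.3.7.11.2" (by decide) h4, Bool.false_eq_true, if_false, if_true]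
        · rw [Bool.not_eq_true] at h4
          by_cases h5 : PySem.Str.startswith t "1.3.6.1.4.1.45" = true
          · simp only [pvVENDOR_OIDS, pvFAM, pvGROUPS, List.cons_append, List.nil_append, pvFirst, pvOuter, pvInner, h1, h2, h3, h4, h5, sw_false_of t "1.3.6.1.4.1.9" "1.3.6.1.4.1.9.1.516" (by decide) h1, sw_false_of t "1.3.6.1.4.1.9" "1.3.6.1.4.1.9.1.174" (by decide) h1, sw_false_of t "1.3.6.1.4.1.9" "1.3.6.1.4.1.9.1.613" (by decide) h1, sw_false_of t "1.3.6.1.4.1.9" "1.3.6.1.4.1.9.1.662" (by decide) h1, sw_false_of t "1.3.6.1.4.1.9" "1.3.6.1.4.1.9.1.1160" (by decide) h1, sw_false_of t "1.3.6.1.4.1.9" "1.3.6.1.4.1.9.1.767" (by decide) h1, sw_false_of t "1.3.6.1.4.1.9" "1.3.6.1.4.1.9.1.1289" (by decide) h1, sw_false_of t "1.3.6.1.4.1.9" "1.3.6.1.4.1.9.1.253" (by decide) h1, sw_false_of t "1.3.6.1.4.1.9" "1.3.6.1.4.1.9.1.257" (by decide) h1, sw_false_of t "1.3.6.1.4.1.674"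 "1.3.6.1.4.1.674.10895.3033" (by decide) h2, sw_false_of t "1.3.6.1.4.1.674" "1.3.6.1.4.1.674.10895.3040" (by decide) h2, sw_false_of t "1.3.6.1.4.1.674" "1.3.6.1.4.1.674.10895.3050" (by decide) h2, sw_false_of t "1.3.6.1.4.1.674" "1.3.6.1.4.1.674.10895.3060" (by decide) h2, sw_false_of t "1.3.6.1.4.1.12356" "1.3.6.1.4.1.12356.101.1" (by decide) h3, sw_false_of t "1.3.6.1.4.1.12356" "1.3.6.1.4.1.12356.101.2" (by decide) h3, sw_false_of t "1.3.6.1.4.1.12356" "1.3.6.1.4.1.12356.101.3" (by decide) h3, sw_false_of t "1.3.6.1.4.1.12356" "1.3.6.1.4.1.12356.101.4" (by decide) h3, sw_false_of t "1.3.6.1.4.1.11" "1.3.6.1.4.1.11.2.3.7.11.1" (by decide) h4, sw_false_of t "1.3.6.1.4.1.11" "1.3.6.1.4.1.11.2.3.7.11.2" (by decide) h4, sw_incomp t "1.3.6.1.4.1.45" "1.3.6.1.4.1.8072.3.2.10" (by decide) h5, sw_incomp t "1.3.6.1.4.1.45" "1.3.6.1.4.1.2021.250.3" (by decide) h5, sw_slice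 t "1.3.6.1.4.1.45" ".3.60.1" "1.3.6.1.4.1.45.3.60.1" (by decide) h5, sw_slice t "1.3.6.1.4.1.45" ".3.60.2" "1.3.6.1.4.1.45.3.60.2" (by decide) h5, Bool.false_eq_true, if_false, if_true]
          · rw [Bool.not_eq_true] at h5
            by_cases h6 : PySem.Str.startswith t "1.3.6.1.4.1.8072.3.2.10" = true
            · simp only [pvVENDOR_OIDS, pvFAM, pvGROUPS, List.cons_append, List.nil_append, pvFirst, pvOuter, pvInner, h1, h2, h3, h4, h5, h6, sw_false_of t "1.3.6.1.4.1.9" "1.3.6.1.4.1.9.1.516" (by decide) h1, sw_false_of t "1.3.6.1.4.1.9" "1.3.6.1.4.1.9.1.174" (by decide) h1, sw_false_of t "1.3.6.1.4.1.9" "1.3.6.1.4.1.9.1.613" (by decide) h1, sw_false_of t "1.3.6.1.4.1.9" "1.3.6.1.4.1.9.1.662" (by decide) h1, sw_false_of t "1.3.6.1.4.1.9" "1.3.6.1.4.1.9.1.1160" (by decide) h1, sw_false_of t "1.3.6.1.4.1.9" "1.3.6.1.4.1.9.1.767" (by decide) h1, sw_false_of t "1.3.6.1.4.1.9" "1.3.6.1.4.1.9.1.1289"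 (by decide) h1, sw_false_of t "1.3.6.1.4.1.9" "1.3.6.1.4.1.9.1.253" (by decide) h1, sw_false_of t "1.3.6.1.4.1.9" "1.3.6.1.4.1.9.1.257" (by decide) h1, sw_false_of t "1.3.6.1.4.1.674" "1.3.6.1.4.1.674.10895.3033" (by decide) h2, sw_false_of t "1.3.6.1.4.1.674" "1.3.6.1.4.1.674.10895.3040" (by decide) h2, sw_false_of t "1.3.6.1.4.1.674" "1.3.6.1.4.1.674.10895.3050" (by decide) h2, sw_false_of t "1.3.6.1.4.1.674" "1.3.6.1.4.1.674.10895.3060" (by decide) h2, sw_false_of t "1.3.6.1.4.1.12356" "1.3.6.1.4.1.12356.101.1" (by decide) h3, sw_false_of t "1.3.6.1.4.1.12356" "1.3.6.1.4.1.12356.101.2" (by decide) h3, sw_false_of t "1.3.6.1.4.1.12356" "1.3.6.1.4.1.12356.101.3" (by decide) h3, sw_false_of t "1.3.6.1.4.1.12356" "1.3.6.1.4.1.12356.101.4" (by decide) h3, sw_false_of t "1.3.6.1.4.1.11" "1.3.6.1.4.1.11.2.3.7.11.1" (by decide) h4, sw_false_of t "1.3.6.1.4.1.11" "1.3.6.1.4.1.11.2.3.7.11.2"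 (by decide) h4, sw_false_of t "1.3.6.1.4.1.45" "1.3.6.1.4.1.45.3.60.1" (by decide) h5, sw_false_of t "1.3.6.1.4.1.45" "1.3.6.1.4.1.45.3.60.2" (by decide) h5, sw_incomp t "1.3.6.1.4.1.8072.3.2.10" "1.3.6.1.4.1.2021.250.3" (by decide) h6, Bool.false_eq_true, if_false, if_true]
            · rw [Bool.not_eq_true] at h6
              by_cases h7 : PySem.Str.startswith t "1.3.6.1.4.1.2021.250.3" = true
              · simp only [pvVENDOR_OIDS, pvFAM, pvGROUPS, List.cons_append, List.nil_append, pvFirst, pvOuter, pvInner, h1, h2, h3, h4, h5, h6, h7, sw_false_of t "1.3.6.1.4.1.9" "1.3.6.1.4.1.9.1.516" (by decide) h1, sw_false_of t "1.3.6.1.4.1.9" "1.3.6.1.4.1.9.1.174" (by decide) h1, sw_false_of t "1.3.6.1.4.1.9" "1.3.6.1.4.1.9.1.613" (by decide) h1, sw_false_of t "1.3.6.1.4.1.9" "1.3.6.1.4.1.9.1.662" (by decide) h1, sw_false_of t "1.3.6.1.4.1.9" "1.3.6.1.4.1.9.1.1160" (by decide) h1, sw_false_of t "1.3.6.1.4.1.9"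 "1.3.6.1.4.1.9.1.767" (by decide) h1, sw_false_of t "1.3.6.1.4.1.9" "1.3.6.1.4.1.9.1.1289" (by decide) h1, sw_false_of t "1.3.6.1.4.1.9" "1.3.6.1.4.1.9.1.253" (by decide) h1, sw_false_of t "1.3.6.1.4.1.9" "1.3.6.1.4.1.9.1.257" (by decide) h1, sw_false_of t "1.3.6.1.4.1.674" "1.3.6.1.4.1.674.10895.3033" (by decide) h2, sw_false_of t "1.3.6.1.4.1.674" "1.3.6.1.4.1.674.10895.3040" (by decide) h2, sw_false_of t "1.3.6.1.4.1.674" "1.3.6.1.4.1.674.10895.3050" (by decide) h2, sw_false_of t "1.3.6.1.4.1.674" "1.3.6.1.4.1.674.10895.3060" (by decide) h2, sw_false_of t "1.3.6.1.4.1.12356" "1.3.6.1.4.1.12356.101.1" (by decide) h3, sw_false_of t "1.3.6.1.4.1.12356" "1.3.6.1.4.1.12356.101.2" (by decide) h3, sw_false_of t "1.3.6.1.4.1.12356" "1.3.6.1.4.1.12356.101.3" (by decide) h3, sw_false_of t "1.3.6.1.4.1.12356" "1.3.6.1.4.1.12356.101.4" (by decide) h3, sw_false_of t "1.3.6.1.4.1.11"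 "1.3.6.1.4.1.11.2.3.7.11.1" (by decide) h4, sw_false_of t "1.3.6.1.4.1.11" "1.3.6.1.4.1.11.2.3.7.11.2" (by decide) h4, sw_false_of t "1.3.6.1.4.1.45" "1.3.6.1.4.1.45.3.60.1" (by decide) h5, sw_false_of t "1.3.6.1.4.1.45" "1.3.6.1.4.1.45.3.60.2" (by decide) h5, Bool.false_eq_true, if_false, if_true]
              · rw [Bool.not_eq_true] at h7
                simp only [pvVENDOR_OIDS, pvFAM, pvGROUPS, List.cons_append, List.nil_append, pvFirst, pvOuter, pvInner, h1, h2, h3, h4, h5, h6, h7, sw_false_of t "1.3.6.1.4.1.9" "1.3.6.1.4.1.9.1.516" (by decide) h1, sw_false_of t "1.3.6.1.4.1.9" "1.3.6.1.4.1.9.1.174" (by decide) h1, sw_false_of t "1.3.6.1.4.1.9" "1.3.6.1.4.1.9.1.613" (by decide) h1, sw_false_of t "1.3.6.1.4.1.9" "1.3.6.1.4.1.9.1.662" (by decide) h1, sw_false_of t "1.3.6.1.4.1.9" "1.3.6.1.4.1.9.1.1160" (by decide) h1, sw_false_of t "1.3.6.1.4.1.9" "1.3.6.1.4.1.9.1.767"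 (by decide) h1, sw_false_of t "1.3.6.1.4.1.9" "1.3.6.1.4.1.9.1.1289" (by decide) h1, sw_false_of t "1.3.6.1.4.1.9" "1.3.6.1.4.1.9.1.253" (by decide) h1, sw_false_of t "1.3.6.1.4.1.9" "1.3.6.1.4.1.9.1.257" (by decide) h1, sw_false_of t "1.3.6.1.4.1.674" "1.3.6.1.4.1.674.10895.3033" (by decide) h2, sw_false_of t "1.3.6.1.4.1.674" "1.3.6.1.4.1.674.10895.3040" (by decide) h2, sw_false_of t "1.3.6.1.4.1.674" "1.3.6.1.4.1.674.10895.3050" (by decide) h2, sw_false_of t "1.3.6.1.4.1.674" "1.3.6.1.4.1.674.10895.3060" (by decide) h2, sw_false_of t "1.3.6.1.4.1.12356" "1.3.6.1.4.1.12356.101.1" (by decide) h3, sw_false_of t "1.3.6.1.4.1.12356" "1.3.6.1.4.1.12356.101.2" (by decide) h3, sw_false_of t "1.3.6.1.4.1.12356" "1.3.6.1.4.1.12356.101.3" (by decide) h3, sw_false_of t "1.3.6.1.4.1.12356" "1.3.6.1.4.1.12356.101.4" (by decide) h3, sw_false_of t "1.3.6.1.4.1.11" "1.3.6.1.4.1.11.2.3.7.11.1"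 (by decide) h4, sw_false_of t "1.3.6.1.4.1.11" "1.3.6.1.4.1.11.2.3.7.11.2" (by decide) h4, sw_false_of t "1.3.6.1.4.1.45" "1.3.6.1.4.1.45.3.60.1" (by decide) h5, sw_false_of t "1.3.6.1.4.1.45" "1.3.6.1.4.1.45.3.60.2" (by decide) h5, Bool.false_eq_true, if_false]

-- ===== VERDICT =====
theorem detect_vendor_spec : Claim_equal_detect_vendor := by
  intro s _
  show detect_vendor s = detect_vendor_alt s
  have hA : detect_vendor s
      = pvFirst (PySem.Str.strip s) (pvVENDOR_OIDS ++ pvFAM) ("Unknown", "Generic SNMP Device") := by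
    rw [← pvLoopA_first]
    rfl
  rw [hA, pvKey]
  rfl
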